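-- pv_equiv track=rewrite | github.com/jearldean/AoC | main.py | put_dots_on_page
-- ===== SOURCE A (Python) =====
-- def put_dots_on_page(dots):
--     x_values = []
--     y_values = []
--     for dot in dots:
--         x_values.append(dot[1])
--         y_values.append(dot[0])
--     x_dimension = max(x_values)
--     y_dimension = max(y_values)
--
--     grid_map = []
--     for dd in range(x_dimension + 1):
--         grid_map.append(['.'] * (y_dimension + 1))
--
--     for coord in dots:
--         grid_map[coord[1]][coord[0]] = "#"
--
--     return grid_map
-- ===== SOURCE B (Python) =====
-- def put_dots_on_page(dots):
--     height = max(d[1] for d in dots) + 1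
--     width = max(d[0] for d in dots) + 1
--     cols_by_row = [[] for _ in range(height)]
--     for x, y in dots:
--         cols_by_row[y].append(x)
--     grid = []
--     for cols in cols_by_row:
--         row = ['.'] * width
--         for x in cols:
--             row[x] = '#'
--         grid.append(row)
--     return grid
-- ===== Notes on version B (the rewrite author's own statement) =====
-- stated objective: alternative
-- what changed: A initializes the whole grid row by row and then mutates cells with 2D random access grid[y][x] per dot; B first buckets each dot's column into a per-row list (cols_by_row[y].append(x)) and then emits each row once, marking only that row's bucketed columns, so the finished grid is streamed row-at-a-time instead of revisited; Pre_ excludes exactly the inputs where both raise (empty list: ValueError from max; a coordinate below -(dimension+1): IndexError).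
import Mathlib
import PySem

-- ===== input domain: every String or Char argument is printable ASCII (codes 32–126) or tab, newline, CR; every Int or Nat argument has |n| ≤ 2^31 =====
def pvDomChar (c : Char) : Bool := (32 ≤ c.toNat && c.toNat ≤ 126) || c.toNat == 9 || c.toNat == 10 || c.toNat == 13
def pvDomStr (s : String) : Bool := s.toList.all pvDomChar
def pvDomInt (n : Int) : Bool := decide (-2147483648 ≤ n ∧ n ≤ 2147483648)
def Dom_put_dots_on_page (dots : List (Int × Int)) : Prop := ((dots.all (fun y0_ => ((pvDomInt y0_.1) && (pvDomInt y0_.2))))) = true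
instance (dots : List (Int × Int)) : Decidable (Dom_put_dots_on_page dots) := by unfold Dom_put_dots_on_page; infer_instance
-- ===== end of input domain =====

-- B replaces A's initialize-whole-grid-then-mutate-per-dot passes by bucketing the dots'
-- columns per row and streaming each finished row out once; objective: alternative.

-- ===== PORT A =====
def put_dots_on_page (dots : List (Int × Int)) : List (List String) :=
  let x_values := dots.foldl (fun acc dot => acc ++ [dot.2]) []
  let y_values := dots.foldl (fun acc dot => acc ++ [dot.1]) []
  match PySem.List.max? x_values (fun v => v), PySem.List.max? y_values (fun v => v) with
  | some x_dimension, some y_dimension =>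
      let grid_map := (PySem.List.pyRange 0 (x_dimension + 1) 1).foldl
        (fun g _dd => g ++ [PySem.List.pyRepeat ["."] (y_dimension + 1)]) []
      -- grid_map[coord[1]][coord[0]] = "#"  (indices in range under Pre_)
      dots.foldl (fun g coord =>
        PySem.List.pySetD g coord.2
          (PySem.List.pySetD (PySem.List.pyGetD g coord.2 []) coord.1 "#")) grid_map
  | _, _ => []  -- unreachable under Pre_ (max() on an empty list raises ValueError)

-- ===== PORT B =====
def put_dots_on_page_alt (dots : List (Int × Int)) : List (List String) :=
  match PySem.List.max? (dots.map (fun d => d.2)) (fun v => v) with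
  | none => []  -- unreachable under Pre_ (max() on an empty sequence raises ValueError)
  | some hmax =>
    match PySem.List.max? (dots.map (fun d => d.1)) (fun v => v) with
    | none => []  -- unreachable under Pre_
    | some wmax =>
        let height := hmax + 1
        let width := wmax + 1
        -- cols_by_row = [[] for _ in range(height)]
        let cols_by_row : List (List Int) := (PySem.List.pyRange 0 height 1).foldl
          (fun a _ => a ++ [[]]) []
        -- for x, y in dots: cols_by_row[y].append(x)   (index in range under Pre_)
        let cols_by_row := dots.foldl (fun cbr d =>
          PySem.List.pySetD cbr d.2 (PySem.List.pyGetD cbr d.2 [] ++ [d.1])) cols_by_row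
        -- for cols in cols_by_row: row = ['.']*width; for x in cols: row[x]='#'; grid.append(row)
        cols_by_row.foldl (fun g cols =>
          g ++ [cols.foldl (fun row x => PySem.List.pySetD row x "#")
                  (PySem.List.pyRepeat ["."] width)]) []

-- ===== PRECONDITION & SPEC =====
-- Pre_ excludes exactly the inputs where A raises: the empty list (ValueError from max()) and
-- any dot whose coordinate lies below -(max+1) of its axis, an IndexError in the marking pass;
-- A returns normally on every admitted input (B raises on exactly the same inputs).
def Pre_put_dots_on_page (dots : List (Int × Int)) : Prop :=
  dots ≠ [] ∧ ∀ d ∈ dots,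
    (∃ e ∈ dots, -e.1 - 1 ≤ d.1) ∧ (∃ e ∈ dots, -e.2 - 1 ≤ d.2)
instance (dots : List (Int × Int)) : Decidable (Pre_put_dots_on_page dots) := by
  unfold Pre_put_dots_on_page; infer_instance
def pvWitness_put_dots_on_page : (List (Int × Int)) := [(0, 0), (2, 1), (-1, -2)]

def Spec_put_dots_on_page (dots : List (Int × Int)) (out : List (List String)) : Prop := out = put_dots_on_page_alt dots
instance (dots : List (Int × Int)) (out : List (List String)) : Decidable (Spec_put_dots_on_page dots out) := by unfold Spec_put_dots_on_page; infer_instance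

-- ===== CLAIM (what is proved, stated in full; the proofs are below) =====
def Claim_equal_put_dots_on_page : Prop := ∀ (dots : List (Int × Int)), Dom_put_dots_on_page dots → Pre_put_dots_on_page dots → Spec_put_dots_on_page dots (put_dots_on_page dots)

-- ===== LEMMAS AND PROOFS =====

-- the canonical grid both programs end at: R×C cells rendered by F
def pvMkGrid (R C : Nat) (F : Nat → Nat → String) : List (List String) :=
  (List.range R).map (fun r => (List.range C).map (fun c => F r c))

theorem pvFoldAppendMap {α β : Type} (f : α → β) :
    ∀ (l : List α) (acc : List β),
      l.foldl (fun a d => a ++ [f d]) acc = acc ++ l.map f := by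
  intro l
  induction l with
  | nil => simp
  | cons h t ih => intro acc; simp [List.foldl, ih]

theorem pvFoldAppendRow {α β : Type} (row : β) :
    ∀ (l : List α) (g : List β),
      l.foldl (fun g _ => g ++ [row]) g = g ++ List.replicate l.length row := by
  intro l
  induction l with
  | nil => simp
  | cons h t ih =>
      intro g
      simp [List.foldl, ih, List.replicate_succ]

theorem pvIdx (n : Nat) (i : Int) (h1 : -(n : Int) ≤ i) (h2 : i < n) :
    PySem.List.pyIdx? n i = some (i % (n : Int)).toNat := by
  by_cases h0 : 0 ≤ i
  · have e3 : i % (n : Int) = i := Int.emod_eq_of_lt h0 h2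
    simp only [PySem.List.pyIdx?]
    rw [if_pos h0, if_pos h2]
    exact congrArg some (by omega)
  · have e3 : i % (n : Int) = i + n := by
      rw [← Int.add_emod_right]
      exact Int.emod_eq_of_lt (by omega) (by omega)
    simp only [PySem.List.pyIdx?]
    rw [if_neg h0, if_pos h1]
    exact congrArg some (by omega)

theorem pvSetD {α : Type} (xs : List α) (i : Int) (v : α)
    (h1 : -(xs.length : Int) ≤ i) (h2 : i < xs.length) :
    PySem.List.pySetD xs i v = xs.set (i % (xs.length : Int)).toNat v := by
  simp [PySem.List.pySetD, PySem.List.pySet?, pvIdx _ _ h1 h2]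

theorem pvGetD {α : Type} (xs : List α) (i : Int) (d : α)
    (h1 : -(xs.length : Int) ≤ i) (h2 : i < xs.length) :
    PySem.List.pyGetD xs i d = xs.getD (i % (xs.length : Int)).toNat d := by
  have hn : 0 < (xs.length : Int) := by omega
  have e1 : 0 ≤ i % (xs.length : Int) := Int.emod_nonneg _ (by omega)
  have e2 : i % (xs.length : Int) < xs.length := Int.emod_lt_of_pos _ hn
  have hk : (i % (xs.length : Int)).toNat < xs.length := by omega
  simp [PySem.List.pyGetD, PySem.List.pyGet?, pvIdx _ _ h1 h2, List.getElem?_eq_getElem hk]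

theorem pvModBound (n : Nat) (i : Int) (hn : 0 < n) : (i % (n : Int)).toNat < n := by
  have := Int.emod_nonneg i (by omega : (n : Int) ≠ 0)
  have := Int.emod_lt_of_pos i (by omega : 0 < (n : Int))
  omega

-- updating one cell of a range-map keeps it a range-map
theorem pvSetRangeMap {α : Type} (n : Nat) (B : Nat → α) (k : Nat) (v : α) (_hk : k < n) :
    ((List.range n).map B).set k v
      = (List.range n).map (fun r => if k = r then v else B r) := by
  apply List.ext_getElem
  · simp
  · intro r h1 h2
    simp [List.getElem_set]

theorem pvGetDRangeMap {α : Type} (n : Nat) (B : Nat → α) (k : Nat) (d : α) (hk : k < n) :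
    ((List.range n).map B).getD k d = B k := by
  have : k < ((List.range n).map B).length := by simpa using hk
  rw [List.getD_eq_getElem _ _ this]
  simp

-- A's marking pass over a rendered grid
theorem pvMarkCore (R C : Nat) (F : Nat → Nat → String) (rn cn : Nat)
    (hr : rn < R) (hc : cn < C) :
    (pvMkGrid R C F).set rn (((pvMkGrid R C F).getD rn []).set cn "#")
      = pvMkGrid R C (fun r c => if rn = r ∧ cn = c then "#" else F r c) := by
  unfold pvMkGrid
  rw [pvGetDRangeMap _ _ _ _ hr, pvSetRangeMap _ _ _ _ hr,
      pvSetRangeMap _ _ _ _ hc]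
  apply List.map_congr_left
  intro r _
  by_cases h : rn = r
  · subst h
    rw [if_pos rfl]
    apply List.map_congr_left
    intro c _
    by_cases hc' : cn = c
    · simp [hc']
    · simp [hc']
  · rw [if_neg h]
    apply List.map_congr_left
    intro c _
    simp [h]

theorem pvMarkStep (R C : Nat) (F : Nat → Nat → String) (d : Int × Int)
    (h1 : -(C : Int) ≤ d.1) (h2 : d.1 < C) (h3 : -(R : Int) ≤ d.2) (h4 : d.2 < R) :
    PySem.List.pySetD (pvMkGrid R C F) d.2
      (PySem.List.pySetD (PySem.List.pyGetD (pvMkGrid R C F) d.2 []) d.1 "#")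
      = pvMkGrid R C (fun r c =>
          if (d.2 % (R : Int)).toNat = r ∧ (d.1 % (C : Int)).toNat = c then "#" else F r c) := by
  have hR : 0 < R := by omega
  have hC : 0 < C := by omega
  have hlenG : (pvMkGrid R C F).length = R := by simp [pvMkGrid]
  have hrn : (d.2 % (R : Int)).toNat < R := pvModBound R d.2 hR
  have hcn : (d.1 % (C : Int)).toNat < C := pvModBound C d.1 hC
  have hrow : PySem.List.pyGetD (pvMkGrid R C F) d.2 []
      = (pvMkGrid R C F).getD (d.2 % (R : Int)).toNat [] := by
    rw [pvGetD _ _ _ (by omega) (by omega), hlenG]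
  have hrowlen : ((pvMkGrid R C F).getD (d.2 % (R : Int)).toNat []).length = C := by
    have : (d.2 % (R : Int)).toNat < (pvMkGrid R C F).length := by omega
    rw [List.getD_eq_getElem _ _ this]
    simp [pvMkGrid]
  rw [hrow]
  rw [pvSetD ((pvMkGrid R C F).getD (d.2 % (R : Int)).toNat []) d.1 "#"
        (by rw [hrowlen]; omega) (by rw [hrowlen]; omega)]
  rw [hrowlen]
  rw [pvSetD (pvMkGrid R C F) d.2 _ (by rw [hlenG]; omega) (by rw [hlenG]; omega)]
  rw [hlenG]
  exact pvMarkCore R C F _ _ hrn hcn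

theorem pvMarkFold (R C : Nat) :
    ∀ (ds : List (Int × Int)) (F : Nat → Nat → String),
      (∀ d ∈ ds, -(C : Int) ≤ d.1 ∧ d.1 < C ∧ -(R : Int) ≤ d.2 ∧ d.2 < R) →
      ds.foldl (fun g coord =>
          PySem.List.pySetD g coord.2
            (PySem.List.pySetD (PySem.List.pyGetD g coord.2 []) coord.1 "#")) (pvMkGrid R C F)
        = pvMkGrid R C (fun r c =>
            if ds.any (fun e => (e.2 % (R : Int)).toNat = r ∧ (e.1 % (C : Int)).toNat = c)
            then "#" else F r c) := by
  intro ds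
  induction ds with
  | nil => intro F _; simp
  | cons d t ih =>
      intro F hb
      obtain ⟨h1, h2, h3, h4⟩ := hb d (by simp)
      have hbt : ∀ e ∈ t, -(C : Int) ≤ e.1 ∧ e.1 < C ∧ -(R : Int) ≤ e.2 ∧ e.2 < R := by
        intro e he; exact hb e (by simp [he])
      rw [List.foldl_cons, pvMarkStep R C F d h1 h2 h3 h4, ih _ hbt]
      apply congrArg
      funext r c
      rw [List.any_cons]
      simp only [Bool.or_eq_true, decide_eq_true_eq]
      by_cases hd' : (d.2 % (R : Int)).toNat = r ∧ (d.1 % (C : Int)).toNat = c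
      · rw [if_pos (Or.inl hd')]
        by_cases ht : (t.any fun e => decide ((e.2 % (R : Int)).toNat = r ∧ (e.1 % (C : Int)).toNat = c)) = true
        · rw [if_pos ht]
        · rw [if_neg ht, if_pos hd']
      · by_cases ht : (t.any fun e => decide ((e.2 % (R : Int)).toNat = r ∧ (e.1 % (C : Int)).toNat = c)) = true
        · rw [if_pos ht, if_pos (Or.inr ht)]
        · rw [if_neg ht, if_neg hd', if_neg (by rintro (h | h); exacts [hd' h, ht h])]

-- B's bucketing pass: appending each dot's column to its (wrapped) row bucket
theorem pvBucketFold (R : Nat) :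
    ∀ (ds : List (Int × Int)) (B : Nat → List Int),
      (∀ d ∈ ds, -(R : Int) ≤ d.2 ∧ d.2 < R) →
      ds.foldl (fun cbr d =>
          PySem.List.pySetD cbr d.2 (PySem.List.pyGetD cbr d.2 [] ++ [d.1]))
        ((List.range R).map B)
        = (List.range R).map (fun r =>
            B r ++ (ds.filter (fun d => (d.2 % (R : Int)).toNat == r)).map (fun d => d.1)) := by
  intro ds
  induction ds with
  | nil => intro B _; simp
  | cons d t ih =>
      intro B hb
      obtain ⟨h1, h2⟩ := hb d (by simp)
      have hR : 0 < R := by omega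
      have hrn : (d.2 % (R : Int)).toNat < R := pvModBound R d.2 hR
      have hlen : ((List.range R).map B).length = R := by simp
      rw [List.foldl_cons,
          pvGetD _ _ _ (by rw [hlen]; omega) (by rw [hlen]; omega),
          pvSetD _ _ _ (by rw [hlen]; omega) (by rw [hlen]; omega), hlen,
          pvGetDRangeMap _ _ _ _ hrn, pvSetRangeMap _ _ _ _ hrn,
          ih _ (fun e he => hb e (by simp [he]))]
      apply List.map_congr_left
      intro r _
      rw [List.filter_cons]
      by_cases h : (d.2 % (R : Int)).toNat = r
      · rw [if_pos h, if_pos (by simpa using h)]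
        simp [h]
      · rw [if_neg h, if_neg (by simpa using h)]

-- B's per-row marking pass over a rendered row
theorem pvRowFold (C : Nat) :
    ∀ (cols : List Int) (F : Nat → String),
      (∀ x ∈ cols, -(C : Int) ≤ x ∧ x < C) →
      cols.foldl (fun row x => PySem.List.pySetD row x "#") ((List.range C).map F)
        = (List.range C).map (fun c =>
            if cols.any (fun x => (x % (C : Int)).toNat == c) then "#" else F c) := by
  intro cols
  induction cols with
  | nil => intro F _; simp
  | cons x t ih =>
      intro F hb
      obtain ⟨h1, h2⟩ := hb x (by simp)
      have hC : 0 < C := by omega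
      have hcn : (x % (C : Int)).toNat < C := pvModBound C x hC
      have hlen : ((List.range C).map F).length = C := by simp
      rw [List.foldl_cons,
          pvSetD _ _ _ (by rw [hlen]; omega) (by rw [hlen]; omega), hlen,
          pvSetRangeMap _ _ _ _ hcn,
          ih _ (fun e he => hb e (by simp [he]))]
      apply List.map_congr_left
      intro c _
      rw [List.any_cons]
      by_cases ht : (t.any fun e => (e % (C : Int)).toNat == c) = true
      · rw [if_pos ht, if_pos (by simp [ht])]
      · rw [if_neg ht]
        by_cases h : (x % (C : Int)).toNat = c
        · rw [if_pos (by simpa using h), if_pos (by simp [h])]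
        · rw [if_neg (by simpa using h), if_neg (by simp [h]; simpa using ht)]

theorem pvMain (dots : List (Int × Int)) (xd yd : Int)
    (hx : PySem.List.max? (dots.map (fun d => d.2)) (fun v => v) = some xd)
    (hy : PySem.List.max? (dots.map (fun d => d.1)) (fun v => v) = some yd)
    (hpre : ∀ d ∈ dots, (∃ e ∈ dots, -e.1 - 1 ≤ d.1) ∧ (∃ e ∈ dots, -e.2 - 1 ≤ d.2)) :
    put_dots_on_page dots = put_dots_on_page_alt dots := by
  have hxmax : ∀ d ∈ dots, d.2 ≤ xd := by
    intro d hd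
    exact PySem.List.max?_isMax hx d.2 (List.mem_map.mpr ⟨d, hd, rfl⟩)
  have hymax : ∀ d ∈ dots, d.1 ≤ yd := by
    intro d hd
    exact PySem.List.max?_isMax hy d.1 (List.mem_map.mpr ⟨d, hd, rfl⟩)
  have hb : ∀ d ∈ dots, -(yd + 1) ≤ d.1 ∧ d.1 ≤ yd ∧ -(xd + 1) ≤ d.2 ∧ d.2 ≤ xd := by
    intro d hd
    obtain ⟨⟨e1, he1, hl1⟩, ⟨e2, he2, hl2⟩⟩ := hpre d hd
    have := hymax e1 he1
    have := hxmax e2 he2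
    exact ⟨by omega, hymax d hd, by omega, hxmax d hd⟩
  have hx0 : 0 ≤ xd := by
    obtain ⟨d, hd, hde⟩ := List.mem_map.mp (PySem.List.max?_mem hx)
    have := (hb d hd).2.2.1; omega
  have hy0 : 0 ≤ yd := by
    obtain ⟨d, hd, hde⟩ := List.mem_map.mp (PySem.List.max?_mem hy)
    have := (hb d hd).1; omega
  have hRC : (((xd + 1).toNat : Int)) = xd + 1 := Int.toNat_of_nonneg (by omega)
  have hCC : (((yd + 1).toNat : Int)) = yd + 1 := Int.toNat_of_nonneg (by omega)
  have hx' : (PySem.List.max? (dots.map Prod.snd) fun v => v) = some xd := hx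
  have hy' : (PySem.List.max? (dots.map Prod.fst) fun v => v) = some yd := hy
  have hbounds : ∀ d ∈ dots,
      -(((yd + 1).toNat : Nat) : Int) ≤ d.1 ∧ d.1 < ((yd + 1).toNat : Nat) ∧
      -(((xd + 1).toNat : Nat) : Int) ≤ d.2 ∧ d.2 < ((xd + 1).toNat : Nat) := by
    intro d hd
    have h := hb d hd
    refine ⟨?_, ?_, ?_, ?_⟩ <;> omega
  unfold put_dots_on_page put_dots_on_page_alt
  rw [pvFoldAppendMap, pvFoldAppendMap, List.nil_append, List.nil_append]
  simp only [hx', hy']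
  -- A's initial grid is the all-'.' R×C grid
  have hinit : (PySem.List.pyRange 0 (xd + 1) 1).foldl
      (fun g _dd => g ++ [PySem.List.pyRepeat ["."] (yd + 1)]) []
      = pvMkGrid (xd + 1).toNat (yd + 1).toNat (fun _ _ => ".") := by
    rw [pvFoldAppendRow, List.nil_append, PySem.List.length_pyRange_one]
    simp [pvMkGrid, PySem.List.pyRepeat_singleton, List.map_const']
  rw [hinit, pvMarkFold _ _ dots (fun _ _ => ".") hbounds]
  -- B's bucket list starts as R empty buckets
  have hbinit : (PySem.List.pyRange 0 (xd + 1) 1).foldl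
      (fun (a : List (List Int)) _ => a ++ [[]]) []
      = (List.range (xd + 1).toNat).map (fun _ => ([] : List Int)) := by
    rw [pvFoldAppendRow, List.nil_append, PySem.List.length_pyRange_one]
    simp [List.map_const']
  rw [hbinit,
      pvBucketFold _ dots (fun _ => []) (fun d hd => ⟨(hbounds d hd).2.2.1, (hbounds d hd).2.2.2⟩),
      pvFoldAppendMap, List.nil_append, List.map_map]
  have hrow : PySem.List.pyRepeat ["."] (yd + 1)
      = (List.range (yd + 1).toNat).map (fun _ => ".") := by
    simp [PySem.List.pyRepeat_singleton, List.map_const']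
  unfold pvMkGrid
  simp only [Function.comp_def, List.nil_append]
  apply List.map_congr_left
  intro r _
  have hxcols : ∀ x ∈ (dots.filter
        (fun d => (d.2 % (((xd + 1).toNat : Nat) : Int)).toNat == r)).map (fun d => d.1),
      -(((yd + 1).toNat : Nat) : Int) ≤ x ∧ x < ((yd + 1).toNat : Nat) := by
    intro x hxm
    obtain ⟨d, hdm, hde⟩ := List.mem_map.mp hxm
    have hd := hbounds d (List.mem_filter.mp hdm).1
    subst hde
    exact ⟨hd.1, hd.2.1⟩
  rw [hrow, pvRowFold _ _ _ hxcols]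
  apply List.map_congr_left
  intro c _
  have hiff : (dots.any (fun e =>
        (e.2 % (((xd + 1).toNat : Nat) : Int)).toNat = r ∧
        (e.1 % (((yd + 1).toNat : Nat) : Int)).toNat = c) = true) ↔
      (((dots.filter (fun d => (d.2 % (((xd + 1).toNat : Nat) : Int)).toNat == r)).map
          (fun d => d.1)).any
        (fun x => (x % (((yd + 1).toNat : Nat) : Int)).toNat == c) = true) := by
    simp only [List.any_eq_true, List.mem_map, List.mem_filter, decide_eq_true_eq,
               beq_iff_eq]
    constructor
    · rintro ⟨d, hd, e1, e2⟩
      exact ⟨d.1, ⟨d, ⟨hd, e1⟩, rfl⟩, e2⟩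
    · rintro ⟨x, ⟨d, ⟨hd, e1⟩, hde⟩, e2⟩
      subst hde
      exact ⟨d, hd, e1, e2⟩
  exact if_congr hiff rfl rfl

-- ===== VERDICT (by name: the statement is the Claim_ definition above) =====
theorem put_dots_on_page_spec : Claim_equal_put_dots_on_page := by
  intro dots _ hpre
  unfold Spec_put_dots_on_page
  cases hx : PySem.List.max? (dots.map (fun d => d.2)) (fun v => v) with
  | none =>
      exact absurd (List.map_eq_nil_iff.mp ((PySem.List.max?_eq_none_iff _ _).mp hx)) hpre.1
  | some xd =>
    cases hy : PySem.List.max? (dots.map (fun d => d.1)) (fun v => v) with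
    | none =>
        exact absurd (List.map_eq_nil_iff.mp ((PySem.List.max?_eq_none_iff _ _).mp hy)) hpre.1
    | some yd =>
        exact pvMain dots xd yd hx hy hpre.2
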